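-- pv_equiv track=rewrite | github.com/Praful/advent_of_code | 2023/src/day01.py | to_digit
-- ===== SOURCE A (Python) =====
-- numbers_as_words = ['one', 'two', 'three', 'four',
--                     'five', 'six', 'seven', 'eight', 'nine']
--
-- def to_digit(c, s):
--     # if c is a digit eg "3", return it
--     # else if s starts with a number word eg "seven", return the number ("7" in this
--     # case)
--
--     if c.isdigit():
--         return c
--     else:
--         for idx, word in enumerate(numbers_as_words, 1):
--             if s.startswith(word):
--                 return str(idx)
--     return ''
-- ===== SOURCE B (Python) =====
-- word_to_digit = {'one': '1', 'two': '2', 'three': '3', 'four': '4',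
--                  'five': '5', 'six': '6', 'seven': '7', 'eight': '8',
--                  'nine': '9'}
--
-- def to_digit(c, s):
--     if c.isdigit():
--         return c
--     for n in (3, 4, 5):
--         d = word_to_digit.get(s[:n])
--         if d is not None:
--             return d
--     return ''
-- ===== Notes on version B (the rewrite author's own statement) =====
-- stated objective: idiomatic
-- what changed: B replaces A's enumerate-and-startswith scan over all nine words with a module-level word->digit dict and three length-sliced lookups (s[:3], s[:4], s[:5]).
import Mathlib
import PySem

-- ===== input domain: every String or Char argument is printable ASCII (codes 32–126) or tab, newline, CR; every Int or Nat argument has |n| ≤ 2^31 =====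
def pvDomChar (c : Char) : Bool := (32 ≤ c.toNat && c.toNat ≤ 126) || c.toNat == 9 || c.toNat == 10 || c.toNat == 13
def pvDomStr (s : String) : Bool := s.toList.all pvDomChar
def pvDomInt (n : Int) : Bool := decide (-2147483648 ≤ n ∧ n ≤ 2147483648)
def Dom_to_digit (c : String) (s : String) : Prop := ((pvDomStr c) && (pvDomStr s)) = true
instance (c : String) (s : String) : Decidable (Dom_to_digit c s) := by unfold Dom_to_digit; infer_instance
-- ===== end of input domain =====

-- B replaces A's enumerate-and-startswith scan over all nine number words with a
-- word->digit dict queried at the three possible word lengths via slices s[:3], s[:4], s[:5] (idiomatic; same cost).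

-- ===== PORT A =====
def numbers_as_words : List String :=
  ["one", "two", "three", "four", "five", "six", "seven", "eight", "nine"]

-- the for-loop with early return over enumerate(numbers_as_words, 1)
def to_digit_loop (s : String) : List (Int × String) → String
  | [] => ""
  | (idx, word) :: rest =>
    if PySem.Str.startswith s word then PySem.Int.toStr idx else to_digit_loop s rest

def to_digit (c : String) (s : String) : String :=
  if PySem.Str.strIsdigit c then c
  else to_digit_loop s (PySem.List.enumerate numbers_as_words 1)

-- ===== PORT B =====
def word_to_digit : PySem.Dict String String :=
  PySem.Dict.ofList [("one", "1"), ("two", "2"), ("three", "3"), ("four", "4"),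
                     ("five", "5"), ("six", "6"), ("seven", "7"), ("eight", "8"),
                     ("nine", "9")]

-- the for-loop with early return over the tuple (3, 4, 5)
def to_digit_alt_loop (s : String) : List Int → String
  | [] => ""
  | n :: rest =>
    match word_to_digit.get? (PySem.Str.slice s none (some n)) with
    | some d => d
    | none => to_digit_alt_loop s rest

def to_digit_alt (c : String) (s : String) : String :=
  if PySem.Str.strIsdigit c then c
  else to_digit_alt_loop s [3, 4, 5]

-- ===== PRECONDITION & SPEC =====
def Spec_to_digit (c : String) (s : String) (out : String) : Prop := out = to_digit_alt c s
instance (c : String) (s : String) (out : String) : Decidable (Spec_to_digit c s out) := by unfold Spec_to_digit; infer_instance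

-- ===== CLAIM (what is proved, stated in full; the proofs are below) =====
def Claim_equal_to_digit : Prop := ∀ (c : String) (s : String), Dom_to_digit c s → Spec_to_digit c s (to_digit c s)

-- ===== LEMMAS AND PROOFS =====

-- startswith as an equation on the prefix of the char list
theorem sw_iff (s w : String) :
    PySem.Str.startswith s w = true ↔ s.toList.take w.toList.length = w.toList := by
  rw [PySem.Str.startswith_eq, PySem.Chars.startswith_iff, List.prefix_iff_eq_take, eq_comm]

-- two words neither of which is a prefix of the other cannot both be prefixes of s
theorem sw_excl (s w v : String) (hw : PySem.Str.startswith s w = true)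
    (hlen : v.toList.length ≤ w.toList.length)
    (hne : w.toList.take v.toList.length ≠ v.toList) :
    PySem.Str.startswith s v = false := by
  rw [Bool.eq_false_iff]
  intro hv
  have h1 := (sw_iff s w).mp hw
  have h2 := (sw_iff s v).mp hv
  apply hne
  rw [← h1, List.take_take]
  rw [min_eq_left hlen]
  exact h2

theorem bff {b : Bool} (h : b = false) : ¬(b = true) := by simp [h]

theorem slice_toList (s : String) (n : Nat) :
    (PySem.Str.slice s none (some (n : Int))).toList = s.toList.take n := by
  simp [PySem.Str.toList_slice, PySem.Chars.slice_eq_listSlice]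

theorem word_to_digit_mk :
    word_to_digit = PySem.Dict.mk [("one", "1"), ("two", "2"), ("three", "3"), ("four", "4"),
                                   ("five", "5"), ("six", "6"), ("seven", "7"), ("eight", "8"),
                                   ("nine", "9")] := by decide

theorem take_ne_of_len (t : List Char) (n : Nat) (w : List Char) (h : n < w.length) :
    t.take n ≠ w := by
  intro he
  have := congrArg List.length he
  simp at this
  omega

-- a word equal to a front slice of s is a prefix of s
theorem take_eq_imp_sw (s w : String) (n : Nat) (h : s.toList.take n = w.toList) :
    PySem.Str.startswith s w = true := by
  rw [PySem.Str.startswith_eq, PySem.Chars.startswith_iff]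
  exact h ▸ List.take_prefix n s.toList

theorem take_ne_of_sw_false (s w : String) (n : Nat)
    (hw : PySem.Str.startswith s w = false) : s.toList.take n ≠ w.toList :=
  fun h => (Bool.eq_false_iff.mp hw) (take_eq_imp_sw s w n h)

theorem get?_key_iff (s : String) (n : Nat) (w : String) :
    ((w == PySem.Str.slice s none (some (n : Int))) = true) ↔ s.toList.take n = w.toList := by
  have hu := slice_toList s n
  rw [beq_iff_eq]
  constructor
  · intro h; rw [h, hu]
  · intro h; apply String.toList_inj.mp; rw [hu]; exact h.symm

theorem get?_mk_nil (x : String) :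
    (PySem.Dict.mk ([] : List (String × String))).get? x = none := rfl

theorem lookup3 (s : String) :
    word_to_digit.get? (PySem.Str.slice s none (some (3 : Int))) =
      if PySem.Str.startswith s "one" = true then some "1"
      else if PySem.Str.startswith s "two" = true then some "2"
      else if PySem.Str.startswith s "six" = true then some "6"
      else none := by
  have K := get?_key_iff s 3
  rw [show ((3 : Nat) : Int) = (3 : Int) from rfl] at K
  rw [word_to_digit_mk]
  simp only [PySem.Dict.get?_mk_cons, get?_mk_nil]
  simp only [K]
  rw [if_neg (take_ne_of_len _ 3 "three".toList (by decide)),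
      if_neg (take_ne_of_len _ 3 "four".toList (by decide)),
      if_neg (take_ne_of_len _ 3 "five".toList (by decide)),
      if_neg (take_ne_of_len _ 3 "seven".toList (by decide)),
      if_neg (take_ne_of_len _ 3 "eight".toList (by decide)),
      if_neg (take_ne_of_len _ 3 "nine".toList (by decide))]
  simp only [sw_iff, show ("one" : String).toList.length = 3 from by decide,
             show ("two" : String).toList.length = 3 from by decide,
             show ("six" : String).toList.length = 3 from by decide]

theorem lookup4 (s : String)
    (h1 : PySem.Str.startswith s "one" = false)
    (h2 : PySem.Str.startswith s "two" = false)
    (h6 : PySem.Str.startswith s "six" = false) :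
    word_to_digit.get? (PySem.Str.slice s none (some (4 : Int))) =
      if PySem.Str.startswith s "four" = true then some "4"
      else if PySem.Str.startswith s "five" = true then some "5"
      else if PySem.Str.startswith s "nine" = true then some "9"
      else none := by
  have K := get?_key_iff s 4
  rw [show ((4 : Nat) : Int) = (4 : Int) from rfl] at K
  rw [word_to_digit_mk]
  simp only [PySem.Dict.get?_mk_cons, get?_mk_nil]
  simp only [K]
  rw [if_neg (take_ne_of_sw_false s "one" 4 h1),
      if_neg (take_ne_of_sw_false s "two" 4 h2),
      if_neg (take_ne_of_len _ 4 "three".toList (by decide)),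
      if_neg (take_ne_of_sw_false s "six" 4 h6),
      if_neg (take_ne_of_len _ 4 "seven".toList (by decide)),
      if_neg (take_ne_of_len _ 4 "eight".toList (by decide))]
  simp only [sw_iff, show ("four" : String).toList.length = 4 from by decide,
             show ("five" : String).toList.length = 4 from by decide,
             show ("nine" : String).toList.length = 4 from by decide]

theorem lookup5 (s : String)
    (h1 : PySem.Str.startswith s "one" = false)
    (h2 : PySem.Str.startswith s "two" = false)
    (h4 : PySem.Str.startswith s "four" = false)
    (h5 : PySem.Str.startswith s "five" = false)
    (h6 : PySem.Str.startswith s "six" = false)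
    (h9 : PySem.Str.startswith s "nine" = false) :
    word_to_digit.get? (PySem.Str.slice s none (some (5 : Int))) =
      if PySem.Str.startswith s "three" = true then some "3"
      else if PySem.Str.startswith s "seven" = true then some "7"
      else if PySem.Str.startswith s "eight" = true then some "8"
      else none := by
  have K := get?_key_iff s 5
  rw [show ((5 : Nat) : Int) = (5 : Int) from rfl] at K
  rw [word_to_digit_mk]
  simp only [PySem.Dict.get?_mk_cons, get?_mk_nil]
  simp only [K]
  rw [if_neg (take_ne_of_sw_false s "one" 5 h1),
      if_neg (take_ne_of_sw_false s "two" 5 h2),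
      if_neg (take_ne_of_sw_false s "four" 5 h4),
      if_neg (take_ne_of_sw_false s "five" 5 h5),
      if_neg (take_ne_of_sw_false s "six" 5 h6),
      if_neg (take_ne_of_sw_false s "nine" 5 h9)]
  simp only [sw_iff, show ("three" : String).toList.length = 5 from by decide,
             show ("seven" : String).toList.length = 5 from by decide,
             show ("eight" : String).toList.length = 5 from by decide]

theorem enum_words :
    PySem.List.enumerate numbers_as_words 1 =
      [((1 : Int), "one"), (2, "two"), (3, "three"), (4, "four"), (5, "five"),
       (6, "six"), (7, "seven"), (8, "eight"), (9, "nine")] := by decide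

theorem else_eq (s : String) :
    to_digit_loop s (PySem.List.enumerate numbers_as_words 1) = to_digit_alt_loop s [3, 4, 5] := by
  rw [enum_words]
  simp only [to_digit_loop, to_digit_alt_loop]
  rw [lookup3 s]
  cases h1 : PySem.Str.startswith s "one" with
  | true => simp only [if_true]; decide
  | false =>
  simp only [Bool.false_eq_true, if_false]
  cases h2 : PySem.Str.startswith s "two" with
  | true => simp only [if_true]; decide
  | false =>
  simp only [Bool.false_eq_true, if_false]
  cases h3 : PySem.Str.startswith s "three" with
  | true =>
    have e4 := sw_excl s "three" "four" h3 (by decide) (by decide)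
    have e5 := sw_excl s "three" "five" h3 (by decide) (by decide)
    have e6 := sw_excl s "three" "six" h3 (by decide) (by decide)
    have e9 := sw_excl s "three" "nine" h3 (by decide) (by decide)
    simp only [if_true]
    rw [if_neg (bff e6), lookup4 s h1 h2 e6, if_neg (bff e4), if_neg (bff e5), if_neg (bff e9),
        lookup5 s h1 h2 e4 e5 e6 e9, if_pos h3]
    decide
  | false =>
  simp only [Bool.false_eq_true, if_false]
  cases h4 : PySem.Str.startswith s "four" with
  | true =>
    have e6 := sw_excl s "four" "six" h4 (by decide) (by decide)
    simp only [if_true]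
    rw [if_neg (bff e6), lookup4 s h1 h2 e6, if_pos h4]
    rfl
  | false =>
  simp only [Bool.false_eq_true, if_false]
  cases h5 : PySem.Str.startswith s "five" with
  | true =>
    have e6 := sw_excl s "five" "six" h5 (by decide) (by decide)
    simp only [if_true]
    rw [if_neg (bff e6), lookup4 s h1 h2 e6, if_neg (bff h4), if_pos h5]
    rfl
  | false =>
  simp only [Bool.false_eq_true, if_false]
  cases h6 : PySem.Str.startswith s "six" with
  | true => simp only [if_true]; decide
  | false =>
  simp only [Bool.false_eq_true, if_false]
  cases h7 : PySem.Str.startswith s "seven" with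
  | true =>
    have e9 := sw_excl s "seven" "nine" h7 (by decide) (by decide)
    simp only [if_true]
    rw [lookup4 s h1 h2 h6, if_neg (bff h4), if_neg (bff h5), if_neg (bff e9),
        lookup5 s h1 h2 h4 h5 h6 e9, if_neg (bff h3), if_pos h7]
    decide
  | false =>
  simp only [Bool.false_eq_true, if_false]
  cases h8 : PySem.Str.startswith s "eight" with
  | true =>
    have e9 := sw_excl s "eight" "nine" h8 (by decide) (by decide)
    simp only [if_true]
    rw [lookup4 s h1 h2 h6, if_neg (bff h4), if_neg (bff h5), if_neg (bff e9),
        lookup5 s h1 h2 h4 h5 h6 e9, if_neg (bff h3), if_neg (bff h7), if_pos h8]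
    decide
  | false =>
  simp only [Bool.false_eq_true, if_false]
  cases h9 : PySem.Str.startswith s "nine" with
  | true =>
    simp only [if_true]
    rw [lookup4 s h1 h2 h6, if_neg (bff h4), if_neg (bff h5), if_pos h9]
    rfl
  | false =>
    simp only [Bool.false_eq_true, if_false]
    rw [lookup4 s h1 h2 h6, if_neg (bff h4), if_neg (bff h5), if_neg (bff h9),
        lookup5 s h1 h2 h4 h5 h6 h9, if_neg (bff h3), if_neg (bff h7), if_neg (bff h8)]

-- ===== VERDICT (by name: the statement is the Claim_ definition above) =====
theorem to_digit_spec : Claim_equal_to_digit := by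
  intro c s _
  show to_digit c s = to_digit_alt c s
  unfold to_digit to_digit_alt
  cases hd : PySem.Str.strIsdigit c with
  | true => simp only [if_true]
  | false => simp only [Bool.false_eq_true, if_false]; exact else_eq s
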